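-- pv_equiv track=rewrite | github.com/ahmadaboshrkie-create/Hello-World | inefficient_example.py | inefficient_data_filtering
-- ===== SOURCE A (Python) =====
-- def inefficient_data_filtering(numbers):
--     """
--     Issue: Multiple passes over the same data
--     Could be done in a single pass
--     """
--     # First pass: filter evens
--     evens = []
--     for num in numbers:
--         if num % 2 == 0:
--             evens.append(num)
--
--     # Second pass: filter > 10
--     large_evens = []
--     for num in evens:
--         if num > 10:
--             large_evens.append(num)
--
--     # Third pass: square them
--     result = []
--     for num in large_evens:
--         result.append(num ** 2)
--
--     return result
-- ===== SOURCE B (Python) =====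
-- def inefficient_data_filtering(numbers):
--     return [num ** 2 for num in numbers if num % 2 == 0 and num > 10]
-- ===== Notes on version B (the rewrite author's own statement) =====
-- stated objective: simpler
-- what changed: Replaces A's three sequential passes with two intermediate lists by a single list comprehension that filters on the combined condition and squares in one pass.
import Mathlib
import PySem

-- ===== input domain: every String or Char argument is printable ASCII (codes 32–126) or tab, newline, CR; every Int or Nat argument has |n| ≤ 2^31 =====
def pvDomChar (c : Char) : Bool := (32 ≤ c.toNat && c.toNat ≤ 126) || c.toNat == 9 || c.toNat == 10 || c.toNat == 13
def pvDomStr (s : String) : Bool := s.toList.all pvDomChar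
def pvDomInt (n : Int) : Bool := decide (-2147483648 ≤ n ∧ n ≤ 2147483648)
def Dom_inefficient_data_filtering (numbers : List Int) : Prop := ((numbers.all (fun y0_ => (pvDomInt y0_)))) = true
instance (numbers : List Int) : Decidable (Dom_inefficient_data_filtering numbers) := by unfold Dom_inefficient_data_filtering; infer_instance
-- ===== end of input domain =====

-- B replaces A's three passes (filter evens, filter > 10, square) with one
-- single-pass comprehension on the combined condition; objective: simpler.

-- ===== PORT A =====
-- three sequential loops, each appending to its own accumulator list
def inefficient_data_filtering (numbers : List Int) : List Int :=
  let evens := numbers.foldl (fun acc num => if num % 2 = 0 then acc ++ [num] else acc) []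
  let large_evens := evens.foldl (fun acc num => if num > 10 then acc ++ [num] else acc) []
  let result := large_evens.foldl (fun acc num => acc ++ [num ^ 2]) []
  result

-- ===== PORT B =====
-- single comprehension: filter on the combined condition, square each kept element
def inefficient_data_filtering_alt (numbers : List Int) : List Int :=
  numbers.filterMap (fun num => if num % 2 = 0 ∧ num > 10 then some (num ^ 2) else none)

-- ===== PRECONDITION & SPEC =====
def Spec_inefficient_data_filtering (numbers : List Int) (out : List Int) : Prop := out = inefficient_data_filtering_alt numbers
instance (numbers : List Int) (out : List Int) : Decidable (Spec_inefficient_data_filtering numbers out) := by unfold Spec_inefficient_data_filtering; infer_instance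

-- ===== CLAIM (what is proved, stated in full; the proofs are below) =====
def Claim_equal_inefficient_data_filtering : Prop := ∀ (numbers : List Int), Dom_inefficient_data_filtering numbers → Spec_inefficient_data_filtering numbers (inefficient_data_filtering numbers)

-- ===== LEMMAS AND PROOFS =====

-- an append-style filtering foldl loop equals acc ++ filter
theorem pv_foldl_filter (p : Int → Prop) [DecidablePred p] (xs : List Int) (acc : List Int) :
    xs.foldl (fun acc num => if p num then acc ++ [num] else acc) acc
      = acc ++ xs.filter (fun num => decide (p num)) := by
  induction xs generalizing acc with
  | nil => simp
  | cons x xs ih =>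
    simp only [List.foldl_cons, List.filter_cons]
    by_cases h : p x <;> simp [h, ih]

-- the squaring foldl loop equals acc ++ map
theorem pv_foldl_sq (xs : List Int) (acc : List Int) :
    xs.foldl (fun acc num => acc ++ [num ^ 2]) acc = acc ++ xs.map (fun num => num ^ 2) := by
  induction xs generalizing acc with
  | nil => simp
  | cons x xs ih => simp [ih]

-- the fused single filter, in simp-normal form
theorem pv_fuse_aux (xs : List Int) :
    List.map (fun num => num ^ 2) (List.filter (fun a => decide (10 < a) && decide (2 ∣ a)) xs)
      = List.filterMap (fun x => if 2 ∣ x ∧ 10 < x then some (x ^ 2) else none) xs := by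
  induction xs with
  | nil => rfl
  | cons x xs ih =>
    by_cases h1 : (2:Int) ∣ x <;> by_cases h2 : (10:Int) < x <;>
      simp [h1, h2, ih]

-- fusing the two filters and the map into one filterMap
theorem pv_fuse (xs : List Int) :
    ((xs.filter (fun num => decide (num % 2 = 0))).filter (fun num => decide (num > 10))).map
        (fun num => num ^ 2)
      = xs.filterMap (fun num => if num % 2 = 0 ∧ num > 10 then some (num ^ 2) else none) := by
  induction xs with
  | nil => rfl
  | cons x xs ih =>
    by_cases h1 : (2:Int) ∣ x <;> by_cases h2 : x > 10 <;>
      simp [h1, h2, pv_fuse_aux]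

-- ===== VERDICT (by name: the statement is the Claim_ definition above) =====
theorem inefficient_data_filtering_spec : Claim_equal_inefficient_data_filtering := by
  intro numbers _
  unfold Spec_inefficient_data_filtering inefficient_data_filtering inefficient_data_filtering_alt
  simp only [pv_foldl_filter, pv_foldl_sq, List.nil_append]
  exact pv_fuse numbers
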